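-- pv_equiv track=rewrite | github.com/cheonyeji/algorithm_study | 프로그래머스/level2/n진수게임.py | solution
-- ===== SOURCE A (Python) =====
-- def aToF(n):
--     if n == 10:
--         return "A"
--     elif n == 11:
--         return "B"
--     elif n == 12:
--         return "C"
--     elif n == 13:
--         return "D"
--     elif n == 14:
--         return "E"
--     elif n == 15:
--         return "F"
--     else:
--         return n
--
-- def convert(n, base):
--
--     if n == 0:
--         return "0"
--
--     num = ""
--     while n > 0:
--         n, mod = divmod(n, base)
--         mod = aToF(mod)
--         num += str(mod)
--     return num[::-1]
--
-- def solution(n, t, m, p):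
--     answer = ""
--     num = 0
--     total = ""
--     index = 0
--     while True:
--         cnum = convert(num, int(n))
--         total += cnum
--         index += len(cnum)
--         q, mod = divmod(index, m)  # m명이서 나눠서 말하는 경우
--         if q >= t:
--             count = 0
--             for i in range(len(total)):
--                 if i % m == (p - 1) and count < t:
--                     answer += total[i]
--                     count += 1
--             break
--         num += 1
--
--     return answer
-- ===== SOURCE B (Python) =====
-- def solution(n, t, m, p):
--     if t <= 0 or p < 1 or p > m:
--         return ""                     # nobody asks for zero digits, and person p must be in the circle
--     DIGITS = "0123456789ABCDEF"
--
--     def char_at(pos):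
--         # character at index pos of the infinite stream "0" + base-n numerals of 1, 2, 3, ...
--         # found by pure arithmetic: skip whole blocks of equal-length numerals, then
--         # read the wanted digit of the one numeral that covers pos -- no string is ever built.
--         if pos == 0:
--             return "0"
--         pos -= 1                      # index into the numerals of 1, 2, 3, ...
--         d = 1                         # numeral length of the current block
--         block = n - 1                 # how many numerals have this length
--         while pos >= d * block:
--             pos -= d * block
--             d += 1
--             block *= n
--         num = n ** (d - 1) + pos // d # the numeral covering pos
--         j = pos % d                   # which of its digits (0 = most significant)
--         return DIGITS[(num // n ** (d - 1 - j)) % n]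
--
--     return "".join(char_at(p - 1 + i * m) for i in range(t))
-- ===== Notes on version B (the rewrite author's own statement) =====
-- stated objective: alternative
-- what changed: B never builds the concatenated base-n string at all: each requested character is computed arithmetically (Champernowne-style digit extraction) by skipping whole blocks of equal-length numerals with closed-form block sizes d*(n-1)*n^(d-1) and then reading one digit of the single numeral that covers the position, whereas A concatenates every numeral up to the needed length and then scans the whole string with an i%m==p-1 filter; Pre_ excludes bases outside 2..16 on real queries (A's str()-of-digit artefacts) and the degenerate m<=0 / never-terminating cases.
-- outside the precondition, e.g. on solution(20, 10, 2, 1): A returns '02468ACE67', B raises IndexError; on solution(-2, 3, 2, 1): A returns '0-1', B returns '00F'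
import Mathlib
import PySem

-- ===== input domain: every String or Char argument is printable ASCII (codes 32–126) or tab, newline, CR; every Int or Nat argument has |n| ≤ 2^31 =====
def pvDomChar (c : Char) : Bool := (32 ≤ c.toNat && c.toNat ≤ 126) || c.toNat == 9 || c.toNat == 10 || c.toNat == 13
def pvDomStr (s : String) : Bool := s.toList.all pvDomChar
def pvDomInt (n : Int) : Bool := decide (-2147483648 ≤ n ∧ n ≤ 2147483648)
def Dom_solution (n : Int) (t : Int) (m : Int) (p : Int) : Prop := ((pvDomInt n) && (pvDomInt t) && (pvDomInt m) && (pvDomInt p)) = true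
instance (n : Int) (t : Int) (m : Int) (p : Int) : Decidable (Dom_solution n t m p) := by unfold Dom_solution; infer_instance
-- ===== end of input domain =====

-- B never builds the concatenated base-n string: each requested character is computed
-- arithmetically, by skipping whole blocks of equal-length numerals (block d holds
-- d*(n-1)*n^(d-1) characters) and reading one digit of the single numeral covering the
-- position (objective: a different, string-free algorithm).

-- ===== PORT A =====
def aToFChars (k : Int) : List Char :=
  if k = 10 then ['A'] else if k = 11 then ['B'] else if k = 12 then ['C']
  else if k = 13 then ['D'] else if k = 14 then ['E'] else if k = 15 then ['F']
  else PySem.Int.toChars k   -- str(mod) on the non-letter branch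

def convertLoopA (fuel : Nat) (x base : Int) (num : List Char) : List Char :=
  match fuel with
  | 0 => num
  | fuel + 1 =>
    if x > 0 then
      match PySem.Int.divmod? x base with
      | some (x', md) => convertLoopA fuel x' base (num ++ aToFChars md)
      | none => num            -- ZeroDivisionError (base = 0, excluded by Pre_)
    else num

def convertA (x base : Int) : List Char :=
  if x = 0 then ['0'] else (convertLoopA (x.toNat + 1) x base []).reverse

-- the inner 'for i in range(len(total))' filter loop of A; 'total' and 'answer' are held in
-- Array Char (Python's str: O(1) indexing, amortized-O(1) append); the characters are the same
def selectA (t m p : Int) (total : Array Char) : Array Char :=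
  ((List.range total.size).foldl
    (fun (st : Array Char × Int) (i : Nat) =>
      if PySem.Int.mod (i : Int) m = p - 1 ∧ st.2 < t
      then (st.1.push (total[i]?.getD ' '), st.2 + 1) else st)
    (#[], 0)).1

def mainLoopA (fuel : Nat) (n t m p : Int) (num : Int) (total : Array Char) (index : Int) : Array Char :=
  match fuel with
  | 0 => #[]                   -- fuel exhaustion (never reached under Pre_)
  | fuel + 1 =>
    let cnum := convertA num n
    let total' := total.appendList cnum
    let index' := index + (cnum.length : Int)
    match PySem.Int.divmod? index' m with
    | none => #[]              -- ZeroDivisionError (m = 0, excluded by Pre_)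
    | some (q, _) =>
      if q ≥ t then selectA t m p total'
      else mainLoopA fuel n t m p (num + 1) total' index'

def solution (n : Int) (t : Int) (m : Int) (p : Int) : String :=
  String.ofList (mainLoopA (t.toNat * m.toNat + 1) n t m p 0 #[] 0).toList

-- ===== PORT B =====
def digitsB : List Char := ['0','1','2','3','4','5','6','7','8','9','A','B','C','D','E','F']

-- the 'while pos >= d * block' loop of char_at, then its digit extraction; the Int
-- exponents d-1 and d-1-j are nonnegative whenever the loop runs (d ≥ 1, j = pos % d < d),
-- so '.toNat' is exact there
def charAtB (fuel : Nat) (n : Int) (pos d block : Int) : Char :=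
  match fuel with
  | 0 => ' '                   -- fuel exhaustion (never reached under Pre_)
  | fuel + 1 =>
    if pos ≥ d * block then charAtB fuel n (pos - d * block) (d + 1) (block * n)
    else
      PySem.List.pyGetD digitsB
        (PySem.Int.mod
          (PySem.Int.floordiv (n ^ (d - 1).toNat + PySem.Int.floordiv pos d)
            (n ^ ((d - 1) - PySem.Int.mod pos d).toNat)) n) ' '

def solution_alt (n : Int) (t : Int) (m : Int) (p : Int) : String :=
  if t ≤ 0 ∨ p < 1 ∨ m < p then ""
  else String.ofList ((PySem.List.pyRange 0 t 1).map (fun i =>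
    let pos := p - 1 + i * m
    if pos = 0 then '0' else charAtB (pos.toNat + 1) n (pos - 1) 1 (n - 1)))

-- ===== PRECONDITION & SPEC =====
-- Pre_ is exactly where A terminates with a value B can sensibly match: m ≠ 0 (m = 0 raises
-- ZeroDivisionError) and m ≥ 1 or t ≤ -1 (otherwise the outer loop never reaches index//m ≥ t),
-- and then one of: t ≤ 0 (both answer "" at once); a person index outside 1..m with a base on
-- which A terminates (A's filter i%m==p-1 can never fire, both answer ""); or the game proper,
-- base 2..16 — or a larger base while only the first p+(t-1)*m ≤ 16 characters (the single-digit
-- numerals 0..15) are ever selected.  It excludes inputs on which A still returns: bases n > 16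
-- needing digits ≥ 16 (A then emits str(digit) and reverses it character-wise, an artefact of
-- num[::-1]; B raises IndexError) and bases n ≤ 1 with a real query (A emits str() of negative
-- remainders there; B's arithmetic digit extraction differs).
def Pre_solution (n : Int) (t : Int) (m : Int) (p : Int) : Prop :=
  m ≠ 0 ∧ (1 ≤ m ∨ t ≤ -1) ∧
  ( t ≤ 0
    ∨ (1 ≤ t ∧ (p < 1 ∨ m < p) ∧ (n ≤ -1 ∨ 2 ≤ n))
    ∨ (1 ≤ t ∧ 1 ≤ p ∧ p ≤ m ∧ 2 ≤ n ∧ (n ≤ 16 ∨ p + (t - 1) * m ≤ 16)) )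
instance (n : Int) (t : Int) (m : Int) (p : Int) : Decidable (Pre_solution n t m p) := by
  unfold Pre_solution; infer_instance

def pvWitness_solution : Int × Int × Int × Int := (2, 4, 2, 1)

def Spec_solution (n : Int) (t : Int) (m : Int) (p : Int) (out : String) : Prop := out = solution_alt n t m p
instance (n : Int) (t : Int) (m : Int) (p : Int) (out : String) : Decidable (Spec_solution n t m p out) := by
  unfold Spec_solution; infer_instance

-- ===== CLAIM (what is proved, stated in full; the proofs are below) =====
def Claim_equal_solution : Prop := ∀ (n : Int) (t : Int) (m : Int) (p : Int), Dom_solution n t m p → Pre_solution n t m p → Spec_solution n t m p (solution n t m p)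

-- ===== LEMMAS AND PROOFS =====

-- list models of A's filter loop and main loop, and the Array→List bridge
def selectAL (t m p : Int) (total : List Char) : List Char :=
  ((List.range total.length).foldl
    (fun (st : List Char × Int) (i : Nat) =>
      if PySem.Int.mod (i : Int) m = p - 1 ∧ st.2 < t
      then (st.1 ++ [total.getD i ' '], st.2 + 1) else st)
    ([], 0)).1

def mainLoopAL (fuel : Nat) (n t m p : Int) (num : Int) (total : List Char) (index : Int) : List Char :=
  match fuel with
  | 0 => []
  | fuel + 1 =>
    let cnum := convertA num n
    let total' := total ++ cnum
    let index' := index + (cnum.length : Int)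
    match PySem.Int.divmod? index' m with
    | none => []
    | some (q, _) =>
      if q ≥ t then selectAL t m p total'
      else mainLoopAL fuel n t m p (num + 1) total' index'

theorem selectA_fold (t m p : Int) (g : Nat → Char) :
    ∀ (L : List Nat) (acc : Array Char) (c : Int),
      (L.foldl (fun (st : Array Char × Int) (i : Nat) =>
          if PySem.Int.mod (i : Int) m = p - 1 ∧ st.2 < t
          then (st.1.push (g i), st.2 + 1) else st) (acc, c)).1.toList
        = (L.foldl (fun (st : List Char × Int) (i : Nat) =>
          if PySem.Int.mod (i : Int) m = p - 1 ∧ st.2 < t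
          then (st.1 ++ [g i], st.2 + 1) else st) (acc.toList, c)).1 := by
  intro L
  induction L with
  | nil => intro acc c; rfl
  | cons i L ih =>
    intro acc c
    simp only [List.foldl_cons]
    by_cases h : PySem.Int.mod (i : Int) m = p - 1 ∧ c < t
    · rw [if_pos h, if_pos h,
        show acc.toList ++ [g i] = (acc.push (g i)).toList from (Array.toList_push).symm]
      exact ih (acc.push (g i)) (c + 1)
    · rw [if_neg h, if_neg h]
      exact ih acc c

theorem toList_appendList' (as : Array Char) (l : List Char) :
    (as.appendList l).toList = as.toList ++ l := by
  simp [Array.appendList_eq_append]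

theorem selectA_toList (t m p : Int) (total : Array Char) :
    (selectA t m p total).toList = selectAL t m p total.toList := by
  unfold selectA selectAL
  rw [Array.length_toList]
  simp only [← Array.getElem?_toList, ← List.getD_eq_getElem?_getD]
  exact selectA_fold t m p (fun i => total.toList.getD i ' ') (List.range total.size) #[] 0

theorem mainLoopA_toList : ∀ (fuel : Nat) (n t m p num : Int) (total : Array Char) (index : Int),
    (mainLoopA fuel n t m p num total index).toList =
      mainLoopAL fuel n t m p num total.toList index := by
  intro fuel
  induction fuel with
  | zero => intro n t m p num total index; rfl
  | succ fuel ih =>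
    intro n t m p num total index
    simp only [mainLoopA, mainLoopAL]
    rcases h : PySem.Int.divmod? (index + ((convertA num n).length : Int)) m with _ | ⟨q, r⟩
    · simp [h]
    · simp only [h]
      by_cases hq : q ≥ t
      · rw [if_pos hq, if_pos hq, selectA_toList, toList_appendList']
      · rw [if_neg hq, if_neg hq, ih, toList_appendList']

-- the canonical digit / numeral / concatenated-stream model both programs are reduced to
def digitC (d : Nat) : Char := digitsB.getD d ' '

def digitsLSB (b x : Nat) : List Char :=
  if h : x = 0 ∨ b < 2 then [] else digitC (x % b) :: digitsLSB b (x / b)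
decreasing_by exact Nat.div_lt_self (by omega) (by omega)

def rep (b x : Nat) : List Char := if x = 0 then ['0'] else (digitsLSB b x).reverse

-- A-side numeral model: the faithful aToF chunk per digit (letters for 10..15, str() otherwise)
def digitsLSBA (b x : Nat) : List Char :=
  if h : x = 0 ∨ b < 2 then [] else aToFChars ((x % b : Nat) : Int) ++ digitsLSBA b (x / b)
decreasing_by exact Nat.div_lt_self (by omega) (by omega)

def repA (b x : Nat) : List Char := if x = 0 then ['0'] else (digitsLSBA b x).reverse

def stream (f : Nat → List Char) (K : Nat) : List Char := (List.range K).flatMap f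

-- B-side model of char_at's loop over Nat
def nthCharAux (b : Nat) (fuel : Nat) (pos d : Nat) : Char :=
  match fuel with
  | 0 => ' '
  | fuel + 1 =>
    if d * ((b - 1) * b ^ (d - 1)) ≤ pos then
      nthCharAux b fuel (pos - d * ((b - 1) * b ^ (d - 1))) (d + 1)
    else digitC (((b ^ (d - 1) + pos / d) / b ^ (d - 1 - pos % d)) % b)

theorem divmod_cast (x b : Nat) (h : 2 ≤ b) :
    PySem.Int.divmod? (x : Int) (b : Int) = some (((x / b : Nat) : Int), ((x % b : Nat) : Int)) := by
  have h0 : (0:Int) ≤ (b:Int) := by omega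
  simp [PySem.Int.divmod?, Int.fdiv_eq_ediv, Int.fmod_eq_emod, h0]
  omega

theorem divmod_of_ne (a b : Int) (h : b ≠ 0) :
    PySem.Int.divmod? a b = some (PySem.Int.floordiv a b, PySem.Int.mod a b) := by
  simp [PySem.Int.divmod?, PySem.Int.floordiv, PySem.Int.mod, h]

theorem aToFChars_eq_digitC (d : Nat) (hd : d < 16) : aToFChars (d : Int) = [digitC d] := by
  interval_cases d <;> decide

theorem toDigitsCore_len (fuel : Nat) : ∀ (n : Nat) (acc : List Char),
    acc.length ≤ (Nat.toDigitsCore 10 fuel n acc).length := by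
  induction fuel with
  | zero => intro n acc; simp [Nat.toDigitsCore]
  | succ fuel ih =>
    intro n acc
    simp only [Nat.toDigitsCore]
    split
    · simp
    · exact le_trans (by simp) (ih _ _)

theorem toDigits_ne_nil (n : Nat) : Nat.toDigits 10 n ≠ [] := by
  have h : (1 : Nat) ≤ (Nat.toDigits 10 n).length := by
    simp only [Nat.toDigits, Nat.toDigitsCore]
    split
    · simp
    · exact le_trans (by simp) (toDigitsCore_len _ _ _)
  intro hc
  rw [hc] at h
  simp at h

theorem aToFChars_ne_nil (k : Int) : aToFChars k ≠ [] := by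
  unfold aToFChars
  split_ifs <;> try simp
  unfold PySem.Int.toChars
  split <;> simp [toDigits_ne_nil]

theorem digitsLSBA_cons (b x : Nat) (hx : x ≠ 0) (hb : 2 ≤ b) :
    digitsLSBA b x = aToFChars ((x % b : Nat) : Int) ++ digitsLSBA b (x / b) := by
  rw [digitsLSBA]; rw [dif_neg (by omega)]

theorem digitsLSB_cons (b x : Nat) (hx : x ≠ 0) (hb : 2 ≤ b) :
    digitsLSB b x = digitC (x % b) :: digitsLSB b (x / b) := by
  rw [digitsLSB]; rw [dif_neg (by omega)]

theorem convertLoopA_eq (fuel : Nat) : ∀ (x b : Nat), x ≤ fuel → 2 ≤ b →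
    ∀ acc, convertLoopA fuel (x : Int) (b : Int) acc = acc ++ digitsLSBA b x := by
  induction fuel with
  | zero =>
    intro x b hx hb acc
    have : x = 0 := by omega
    subst this
    rw [digitsLSBA]; simp [convertLoopA]
  | succ fuel ih =>
    intro x b hx hb acc
    by_cases hx0 : x = 0
    · subst hx0
      rw [digitsLSBA]; simp [convertLoopA]
    · have hxpos : ((x : Int) > 0) := by omega
      have hdiv : x / b < x := Nat.div_lt_self (Nat.pos_of_ne_zero hx0) (by omega)
      simp only [convertLoopA, if_pos hxpos, divmod_cast x b hb]
      rw [ih (x / b) b (by omega) hb, digitsLSBA_cons b x hx0 hb]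
      simp

theorem convertA_eq_repA (x b : Nat) (hb : 2 ≤ b) :
    convertA (x : Int) (b : Int) = repA b x := by
  unfold convertA repA
  by_cases hx0 : x = 0
  · subst hx0; simp
  · rw [if_neg (by exact_mod_cast hx0), if_neg hx0]
    rw [show ((x : Int).toNat + 1) = x + 1 by simp]
    rw [convertLoopA_eq (x + 1) x b (by omega) hb []]
    simp

theorem digitsLSBA_eq_digitsLSB (b : Nat) (hb : 2 ≤ b) :
    ∀ x, (b ≤ 16 ∨ x < 16) → digitsLSBA b x = digitsLSB b x := by
  intro x
  induction x using Nat.strong_induction_on with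
  | _ x ih =>
    intro hsmall
    by_cases hx0 : x = 0
    · subst hx0; rw [digitsLSBA, digitsLSB]; simp
    · have hdiv : x / b < x := Nat.div_lt_self (Nat.pos_of_ne_zero hx0) (by omega)
      have hmod : x % b < 16 := by
        have h1 : x % b < b := Nat.mod_lt x (by omega)
        have h2 : x % b ≤ x := Nat.mod_le x b
        omega
      rw [digitsLSBA_cons b x hx0 hb, digitsLSB_cons b x hx0 hb,
        aToFChars_eq_digitC (x % b) hmod,
        ih (x / b) hdiv (by
          rcases hsmall with h | h
          · exact Or.inl h
          · exact Or.inr (by have := Nat.div_le_self x b; omega))]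
      simp

theorem repA_eq_rep (b x : Nat) (hb : 2 ≤ b) (hsmall : b ≤ 16 ∨ x < 16) :
    repA b x = rep b x := by
  unfold repA rep
  rw [digitsLSBA_eq_digitsLSB b hb x hsmall]

theorem rep_ne_nil (b x : Nat) (hb : 2 ≤ b) : rep b x ≠ [] := by
  unfold rep
  by_cases hx0 : x = 0
  · simp [hx0]
  · rw [if_neg hx0, digitsLSB_cons b x hx0 hb]
    simp

theorem repA_ne_nil (b x : Nat) (hb : 2 ≤ b) : repA b x ≠ [] := by
  unfold repA
  by_cases hx0 : x = 0
  · simp [hx0]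
  · rw [if_neg hx0, digitsLSBA_cons b x hx0 hb]
    simp [aToFChars_ne_nil]

theorem convertLoopA_acc (fuel : Nat) : ∀ (x base : Int) (acc : List Char),
    ∃ r, convertLoopA fuel x base acc = acc ++ r := by
  induction fuel with
  | zero => intro x base acc; exact ⟨[], by simp [convertLoopA]⟩
  | succ fuel ih =>
    intro x base acc
    by_cases hx : x > 0
    · rcases hdm : PySem.Int.divmod? x base with _ | ⟨x', md⟩
      · exact ⟨[], by simp [convertLoopA, hx, hdm]⟩
      · obtain ⟨r, hr⟩ := ih x' base (acc ++ aToFChars md)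
        exact ⟨aToFChars md ++ r, by simp [convertLoopA, hx, hdm, hr]⟩
    · exact ⟨[], by simp [convertLoopA, if_neg hx]⟩

theorem convertA_ne_nil (x : Nat) (n : Int) (hn0 : n ≠ 0) : convertA (x : Int) n ≠ [] := by
  by_cases hx0 : x = 0
  · subst hx0; simp [convertA]
  · unfold convertA
    rw [if_neg (by exact_mod_cast hx0), show ((x : Int).toNat + 1) = x + 1 by simp]
    simp only [convertLoopA, if_pos (show ((x : Int) > 0) by omega),
      divmod_of_ne (x : Int) n hn0]
    obtain ⟨r, hr⟩ := convertLoopA_acc x (PySem.Int.floordiv (x : Int) n) n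
      ([] ++ aToFChars (PySem.Int.mod (x : Int) n))
    rw [hr]
    simp [aToFChars_ne_nil]

theorem stream_succ (f : Nat → List Char) (K : Nat) : stream f (K + 1) = stream f K ++ f K := by
  simp [stream, List.range_succ]

theorem le_length_stream (f : Nat → List Char) (K : Nat) (hne : ∀ x, f x ≠ []) :
    K ≤ (stream f K).length := by
  induction K with
  | zero => simp
  | succ K ih =>
    rw [stream_succ]
    have h1 : 1 ≤ (f K).length := List.length_pos_iff.mpr (hne K)
    simp only [List.length_append]
    omega

theorem range_prefix (K K' : Nat) (h : K ≤ K') : List.range K <+: List.range K' := by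
  refine ⟨List.range' K (K' - K), ?_⟩
  have e := @List.range'_append 0 K (K' - K) 1
  simp at e
  rw [List.range_eq_range', List.range_eq_range', e]
  congr 1; omega

theorem stream_prefix (f : Nat → List Char) (K K' : Nat) (h : K ≤ K') :
    stream f K <+: stream f K' := by
  exact List.IsPrefix.flatMap (range_prefix K K' h) f

theorem getD_prefix_eq {α : Type} (l l' : List α) (d : α) (i : Nat)
    (h : l <+: l') (hi : i < l.length) : l.getD i d = l'.getD i d := by
  obtain ⟨tl, rfl⟩ := h
  simp [List.getD, List.getElem?_append_left hi]

theorem getD_stream_eq (f : Nat → List Char) (K K' i : Nat)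
    (h : i < (stream f K).length) (h' : i < (stream f K').length) :
    (stream f K).getD i ' ' = (stream f K').getD i ' ' := by
  rcases le_total K K' with hle | hle
  · exact getD_prefix_eq _ _ _ _ (stream_prefix f K K' hle) h
  · exact (getD_prefix_eq _ _ _ _ (stream_prefix f K' K hle) h').symm

theorem stream_congr (f g : Nat → List Char) (K : Nat) (hfg : ∀ x, x < K → f x = g x) :
    stream f K = stream g K := by
  induction K with
  | zero => rfl
  | succ K ih =>
    rw [stream_succ, stream_succ, ih (fun x hx => hfg x (by omega)), hfg K (by omega)]

-- streams over chunk sequences that agree below X0 have the same characters below X0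
theorem getD_cross (f g : Nat → List Char) (X0 K K' pos : Nat)
    (hnef : ∀ x, f x ≠ []) (hneg : ∀ x, g x ≠ [])
    (hfg : ∀ x, x < X0 → f x = g x) (hpos : pos < X0)
    (h1 : pos < (stream f K).length) (h2 : pos < (stream g K').length) :
    (stream f K).getD pos ' ' = (stream g K').getD pos ' ' := by
  have hcong : stream f (min K X0) = stream g (min K X0) :=
    stream_congr f g _ (fun x hx => hfg x (lt_of_lt_of_le hx (Nat.min_le_right K X0)))
  have hlf : pos < (stream f (min K X0)).length := by
    rcases le_total K X0 with h | h
    · rw [Nat.min_eq_left h]; exact h1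
    · rw [Nat.min_eq_right h]
      exact lt_of_lt_of_le hpos (le_length_stream f X0 hnef)
  have hlg : pos < (stream g (min K' X0)).length := by
    rcases le_total K' X0 with h | h
    · rw [Nat.min_eq_left h]; exact h2
    · rw [Nat.min_eq_right h]
      exact lt_of_lt_of_le hpos (le_length_stream g X0 hneg)
  have e1 : (stream f K).getD pos ' ' = (stream f (min K X0)).getD pos ' ' :=
    (getD_prefix_eq _ _ _ _ (stream_prefix f _ K (Nat.min_le_left K X0)) hlf).symm
  have e2 : (stream g K').getD pos ' ' = (stream g (min K' X0)).getD pos ' ' :=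
    (getD_prefix_eq _ _ _ _ (stream_prefix g _ K' (Nat.min_le_left K' X0)) hlg).symm
  rw [e1, e2, hcong]
  exact getD_stream_eq g _ _ pos (by rw [← hcong]; exact hlf) hlg

-- ===== new B-side lemmas =====

theorem rep_len (b : Nat) (hb : 2 ≤ b) : ∀ d x, 1 ≤ d → b ^ (d - 1) ≤ x → x < b ^ d →
    (rep b x).length = d := by
  intro d
  induction d with
  | zero => intro x h; omega
  | succ d ih =>
    intro x _ hlo hhi
    have hb1 : 1 ≤ b ^ (d + 1 - 1) := Nat.one_le_pow _ _ (by omega)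
    have hx0 : x ≠ 0 := by omega
    rw [rep, if_neg hx0, List.length_reverse, digitsLSB_cons b x hx0 hb]
    by_cases hd0 : d = 0
    · subst hd0
      have hxb : x < b := by simpa using hhi
      have : x / b = 0 := Nat.div_eq_of_lt hxb
      rw [this, digitsLSB]
      simp
    · have hd1 : 1 ≤ d := by omega
      have hpow : b ^ (d - 1) * b = b ^ d := by rw [← pow_succ]; congr 1; omega
      have hblo : b ^ (d - 1) ≤ x / b := by
        rw [Nat.le_div_iff_mul_le (by omega)]
        calc b ^ (d - 1) * b = b ^ d := hpow
        _ ≤ x := by simpa [show d + 1 - 1 = d by omega] using hlo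
      have hbhi : x / b < b ^ d := by
        rw [Nat.div_lt_iff_lt_mul (by omega)]
        calc x < b ^ (d + 1) := hhi
        _ = b ^ d * b := by rw [pow_succ]
      have hy0 : x / b ≠ 0 := by
        have : 1 ≤ b ^ (d - 1) := Nat.one_le_pow _ _ (by omega)
        omega
      have hlen : (digitsLSB b (x / b)).length = d := by
        have h := ih (x / b) hd1 hblo hbhi
        rw [rep, if_neg hy0, List.length_reverse] at h
        exact h
      simp [hlen]

theorem rep_getD (b : Nat) (hb : 2 ≤ b) : ∀ d x j, 1 ≤ d → b ^ (d - 1) ≤ x → x < b ^ d → j < d →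
    (rep b x).getD j ' ' = digitC ((x / b ^ (d - 1 - j)) % b) := by
  intro d
  induction d with
  | zero => intro x j h; omega
  | succ d ih =>
    intro x j _ hlo hhi hj
    have hb1 : 1 ≤ b ^ (d + 1 - 1) := Nat.one_le_pow _ _ (by omega)
    have hx0 : x ≠ 0 := by omega
    rw [rep, if_neg hx0, digitsLSB_cons b x hx0 hb, List.reverse_cons]
    by_cases hd0 : d = 0
    · subst hd0
      have hj0 : j = 0 := by omega
      subst hj0
      have hxb : x < b := by simpa using hhi
      have hdiv : x / b = 0 := Nat.div_eq_of_lt hxb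
      rw [hdiv, digitsLSB]
      simp [List.getD]
    · have hd1 : 1 ≤ d := by omega
      have hpow : b ^ (d - 1) * b = b ^ d := by rw [← pow_succ]; congr 1; omega
      have hblo : b ^ (d - 1) ≤ x / b := by
        rw [Nat.le_div_iff_mul_le (by omega)]
        calc b ^ (d - 1) * b = b ^ d := hpow
        _ ≤ x := by simpa [show d + 1 - 1 = d by omega] using hlo
      have hbhi : x / b < b ^ d := by
        rw [Nat.div_lt_iff_lt_mul (by omega)]
        calc x < b ^ (d + 1) := hhi
        _ = b ^ d * b := by rw [pow_succ]
      have hy0 : x / b ≠ 0 := by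
        have : 1 ≤ b ^ (d - 1) := Nat.one_le_pow _ _ (by omega)
        omega
      have hlen : (digitsLSB b (x / b)).reverse.length = d := by
        have h := rep_len b hb d (x / b) hd1 hblo hbhi
        rw [rep, if_neg hy0] at h
        simpa using h
      by_cases hjd : j < d
      · have hgl : ((digitsLSB b (x / b)).reverse ++ [digitC (x % b)]).getD j ' ' =
            (digitsLSB b (x / b)).reverse.getD j ' ' := by
          simp [List.getD, List.getElem?_append_left (show j < (digitsLSB b (x / b)).reverse.length by omega)]
        rw [hgl]
        have hih := ih (x / b) j hd1 hblo hbhi hjd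
        rw [rep, if_neg hy0] at hih
        rw [hih]
        congr 2
        rw [Nat.div_div_eq_div_mul]
        congr 1
        rw [← pow_succ']
        congr 1
        omega
      · have hjd' : j = d := by omega
        rw [hjd']
        have hgr : ((digitsLSB b (x / b)).reverse ++ [digitC (x % b)]).getD d ' ' = digitC (x % b) := by
          simp [List.getD, List.getElem?_append_right hlen.le, hlen]
        rw [hgr]
        congr 1
        simp [show d + 1 - 1 - d = 0 by omega]

theorem block_len (b d : Nat) : ∀ cnt a, (∀ x, a ≤ x → x < a + cnt → (rep b x).length = d) →
    ((List.range' a cnt).flatMap (rep b)).length = cnt * d := by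
  intro cnt
  induction cnt with
  | zero => intro a _; simp
  | succ cnt ih =>
    intro a h
    rw [List.range'_succ]
    simp only [List.flatMap_cons, List.length_append]
    rw [ih (a + 1) (fun x hx1 hx2 => h x (by omega) (by omega)), h a (by omega) (by omega)]
    ring

theorem block_getD (b d : Nat) (hd : 0 < d) : ∀ cnt a q,
    (∀ x, a ≤ x → x < a + cnt → (rep b x).length = d) → q < cnt * d →
    ((List.range' a cnt).flatMap (rep b)).getD q ' ' = (rep b (a + q / d)).getD (q % d) ' ' := by
  intro cnt
  induction cnt with
  | zero => intro a q _ hq; simp at hq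
  | succ cnt ih =>
    intro a q h hq
    rw [List.range'_succ]
    simp only [List.flatMap_cons]
    have hlena : (rep b a).length = d := h a (by omega) (by omega)
    by_cases hqd : q < d
    · have hgl : ((rep b a) ++ (List.range' (a + 1) cnt).flatMap (rep b)).getD q ' ' =
          (rep b a).getD q ' ' := by
        simp [List.getD, List.getElem?_append_left (show q < (rep b a).length by omega)]
      rw [hgl, Nat.div_eq_of_lt hqd, Nat.mod_eq_of_lt hqd]
      simp
    · obtain ⟨r, rfl⟩ : ∃ r, q = r + d := ⟨q - d, by omega⟩
      have hgr : ((rep b a) ++ (List.range' (a + 1) cnt).flatMap (rep b)).getD (r + d) ' ' =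
          ((List.range' (a + 1) cnt).flatMap (rep b)).getD r ' ' := by
        simp [List.getD, List.getElem?_append_right (show (rep b a).length ≤ r + d by omega), hlena]
      have hmul : (cnt + 1) * d = cnt * d + d := by ring
      rw [hgr, ih (a + 1) r (fun x h1 h2 => h x (by omega) (by omega)) (by omega),
        Nat.add_div_right _ hd, Nat.add_mod_right]
      congr 2
      omega

theorem range'_prefix (a K K' : Nat) (h : K ≤ K') : List.range' a K <+: List.range' a K' := by
  refine ⟨List.range' (a + K) (K' - K), ?_⟩
  rw [List.range'_append_1]
  congr 1
  omega

theorem nthCharAux_stream (b : Nat) (hb : 2 ≤ b) : ∀ fuel pos d K, 1 ≤ d → pos < fuel →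
    pos < ((List.range' (b ^ (d - 1)) K).flatMap (rep b)).length →
    nthCharAux b fuel pos d = ((List.range' (b ^ (d - 1)) K).flatMap (rep b)).getD pos ' ' := by
  intro fuel
  induction fuel with
  | zero => intro pos d K _ h; omega
  | succ fuel ih =>
    intro pos d K hd hfuel hlen
    have hppos : 1 ≤ b ^ (d - 1) := Nat.one_le_pow _ _ (by omega)
    have hcnt0pos : 1 ≤ (b - 1) * b ^ (d - 1) := by
      have : 1 * 1 ≤ (b - 1) * b ^ (d - 1) := Nat.mul_le_mul (by omega) hppos
      omega
    have hasum : b ^ (d - 1) + (b - 1) * b ^ (d - 1) = b ^ d := by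
      have h1 : b ^ (d - 1) * b = b ^ d := by rw [← pow_succ]; congr 1; omega
      calc b ^ (d - 1) + (b - 1) * b ^ (d - 1) = (1 + (b - 1)) * b ^ (d - 1) := by ring
      _ = b * b ^ (d - 1) := by congr 1; omega
      _ = b ^ d := by rw [mul_comm]; exact h1
    have huni : ∀ x, b ^ (d - 1) ≤ x → x < b ^ (d - 1) + (b - 1) * b ^ (d - 1) →
        (rep b x).length = d := by
      intro x h1 h2
      exact rep_len b hb d x hd h1 (by omega)
    rw [nthCharAux]
    by_cases hskip : d * ((b - 1) * b ^ (d - 1)) ≤ pos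
    · rw [if_pos hskip]
      have hKgt : (b - 1) * b ^ (d - 1) < K := by
        by_contra hKle
        push_neg at hKle
        have hL := block_len b d K (b ^ (d - 1)) (fun x h1 h2 => huni x h1 (by omega))
        rw [hL] at hlen
        have h2 : K * d ≤ ((b - 1) * b ^ (d - 1)) * d := Nat.mul_le_mul_right d hKle
        have h3 : d * ((b - 1) * b ^ (d - 1)) = ((b - 1) * b ^ (d - 1)) * d := Nat.mul_comm _ _
        omega
      have hsplit : List.range' (b ^ (d - 1)) K =
          List.range' (b ^ (d - 1)) ((b - 1) * b ^ (d - 1)) ++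
            List.range' (b ^ (d - 1) + (b - 1) * b ^ (d - 1)) (K - (b - 1) * b ^ (d - 1)) := by
        rw [List.range'_append_1]
        congr 1
        omega
      rw [hsplit, List.flatMap_append] at hlen ⊢
      have hlenL : ((List.range' (b ^ (d - 1)) ((b - 1) * b ^ (d - 1))).flatMap (rep b)).length =
          ((b - 1) * b ^ (d - 1)) * d := block_len b d _ _ huni
      simp only [List.length_append] at hlen
      have hmulc : d * ((b - 1) * b ^ (d - 1)) = ((b - 1) * b ^ (d - 1)) * d := Nat.mul_comm _ _
      have hgr : ∀ (L R : List Char), L.length = ((b - 1) * b ^ (d - 1)) * d →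
          ((b - 1) * b ^ (d - 1)) * d ≤ pos →
          (L ++ R).getD pos ' ' = R.getD (pos - ((b - 1) * b ^ (d - 1)) * d) ' ' := by
        intro L R hL hge
        simp [List.getD, List.getElem?_append_right (by omega : L.length ≤ pos), hL]
      rw [hgr _ _ hlenL (by omega)]
      have hstart : b ^ (d - 1) + (b - 1) * b ^ (d - 1) = b ^ ((d + 1) - 1) := by
        simp only [Nat.add_sub_cancel]; exact hasum
      rw [hstart]
      rw [show pos - d * ((b - 1) * b ^ (d - 1)) = pos - ((b - 1) * b ^ (d - 1)) * d by omega]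
      have hpd : 1 * 1 ≤ ((b - 1) * b ^ (d - 1)) * d := Nat.mul_le_mul hcnt0pos hd
      exact ih (pos - ((b - 1) * b ^ (d - 1)) * d) (d + 1) (K - (b - 1) * b ^ (d - 1))
        (by omega) (by omega) (by rw [← hstart]; omega)
    · rw [if_neg hskip]
      push_neg at hskip
      have hK'le : min K ((b - 1) * b ^ (d - 1)) ≤ K := Nat.min_le_left _ _
      have hK'cnt : min K ((b - 1) * b ^ (d - 1)) ≤ (b - 1) * b ^ (d - 1) := Nat.min_le_right _ _
      have hpref : (List.range' (b ^ (d - 1)) (min K ((b - 1) * b ^ (d - 1)))).flatMap (rep b) <+: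
          (List.range' (b ^ (d - 1)) K).flatMap (rep b) :=
        List.IsPrefix.flatMap (range'_prefix _ _ _ hK'le) _
      have hlenL : ((List.range' (b ^ (d - 1)) (min K ((b - 1) * b ^ (d - 1)))).flatMap (rep b)).length =
          (min K ((b - 1) * b ^ (d - 1))) * d :=
        block_len b d _ _ (fun x h1 h2 => huni x h1 (by omega))
      have hposK' : pos < (min K ((b - 1) * b ^ (d - 1))) * d := by
        rcases le_total K ((b - 1) * b ^ (d - 1)) with hc | hc
        · rw [Nat.min_eq_left hc]
          have hL := block_len b d K (b ^ (d - 1)) (fun x h1 h2 => huni x h1 (by omega))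
          rw [hL] at hlen
          exact hlen
        · rw [Nat.min_eq_right hc]
          have : d * ((b - 1) * b ^ (d - 1)) = ((b - 1) * b ^ (d - 1)) * d := Nat.mul_comm _ _
          omega
      rw [← getD_prefix_eq _ _ ' ' pos hpref (by omega)]
      rw [block_getD b d (by omega) _ _ _ (fun x h1 h2 => huni x h1 (by omega)) hposK']
      have hdivlt : pos / d < (b - 1) * b ^ (d - 1) := by
        rw [Nat.div_lt_iff_lt_mul (by omega)]
        have : d * ((b - 1) * b ^ (d - 1)) = ((b - 1) * b ^ (d - 1)) * d := Nat.mul_comm _ _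
        omega
      rw [rep_getD b hb d (b ^ (d - 1) + pos / d) (pos % d) hd (Nat.le_add_right _ _)
        (by rw [← hasum]; omega) (Nat.mod_lt _ (by omega))]

theorem charAtB_eq (b : Nat) (hb : 2 ≤ b) : ∀ (fuel pos d : Nat), 1 ≤ d →
    charAtB fuel (b : Int) (pos : Int) (d : Int) (((b - 1) * b ^ (d - 1) : Nat) : Int) =
      nthCharAux b fuel pos d := by
  intro fuel
  induction fuel with
  | zero => intro pos d hd; rfl
  | succ fuel ih =>
    intro pos d hd
    rw [charAtB, nthCharAux]
    by_cases hskip : d * ((b - 1) * b ^ (d - 1)) ≤ pos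
    · rw [if_pos (by rw [ge_iff_le, ← Nat.cast_mul, Nat.cast_le]; exact hskip :
          (pos : Int) ≥ (d : Int) * (((b - 1) * b ^ (d - 1) : Nat) : Int)), if_pos hskip]
      have e1 : (pos : Int) - (d : Int) * (((b - 1) * b ^ (d - 1) : Nat) : Int) =
          ((pos - d * ((b - 1) * b ^ (d - 1)) : Nat) : Int) := by rw [← Nat.cast_mul]; omega
      have e2 : (d : Int) + 1 = ((d + 1 : Nat) : Int) := by push_cast; ring
      have e3n : (b - 1) * b ^ (d - 1) * b = (b - 1) * b ^ ((d + 1) - 1) := by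
        rw [mul_assoc, ← pow_succ]
        congr 2
        omega
      have e3 : (((b - 1) * b ^ (d - 1) : Nat) : Int) * (b : Int) =
          (((b - 1) * b ^ ((d + 1) - 1) : Nat) : Int) := by exact_mod_cast congrArg Nat.cast e3n
      rw [e1, e2, e3]
      exact ih _ (d + 1) (by omega)
    · rw [if_neg (by rw [ge_iff_le, ← Nat.cast_mul, Nat.cast_le]; exact hskip :
          ¬ (pos : Int) ≥ (d : Int) * (((b - 1) * b ^ (d - 1) : Nat) : Int)), if_neg hskip]
      have hmodlt : pos % d < d := Nat.mod_lt _ (by omega)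
      have c1 : PySem.Int.mod (pos : Int) (d : Int) = ((pos % d : Nat) : Int) :=
        PySem.Int.mod_natCast pos d
      have c2 : PySem.Int.floordiv (pos : Int) (d : Int) = ((pos / d : Nat) : Int) :=
        PySem.Int.floordiv_natCast pos d
      have c3 : ((d : Int) - 1).toNat = d - 1 := by omega
      have c4 : (b : Int) ^ (d - 1) = ((b ^ (d - 1) : Nat) : Int) := by push_cast; ring
      have c5 : ((d : Int) - 1 - ((pos % d : Nat) : Int)).toNat = d - 1 - pos % d := by omega
      rw [c1, c2, c3, c5, c4]
      have c6 : (((b ^ (d - 1) : Nat) : Int) + ((pos / d : Nat) : Int)) =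
          ((b ^ (d - 1) + pos / d : Nat) : Int) := by push_cast; ring
      have c7 : (b : Int) ^ (d - 1 - pos % d) = ((b ^ (d - 1 - pos % d) : Nat) : Int) := by
        push_cast; ring
      rw [c6, c7, PySem.Int.floordiv_natCast, PySem.Int.mod_natCast,
        PySem.List.pyGetD_natCast]
      rfl

theorem stream_split (b : Nat) (K : Nat) (hK : 1 ≤ K) :
    stream (rep b) K = '0' :: (List.range' 1 (K - 1)).flatMap (rep b) := by
  obtain ⟨K', rfl⟩ : ∃ K', K = K' + 1 := ⟨K - 1, by omega⟩
  unfold stream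
  rw [List.range_eq_range', List.range'_succ]
  simp [rep]

theorem altChar_eq_stream (b : Nat) (n : Int) (hn : n = ((b : Nat) : Int)) (hb : 2 ≤ b)
    (pos K : Nat) (hlen : pos < (stream (rep b) K).length) :
    (if ((pos : Nat) : Int) = 0 then '0'
     else charAtB (((pos : Nat) : Int).toNat + 1) n (((pos : Nat) : Int) - 1) 1 (n - 1))
    = (stream (rep b) K).getD pos ' ' := by
  subst hn
  have hK : 1 ≤ K := by
    rcases Nat.eq_zero_or_pos K with rfl | h
    · simp [stream] at hlen
    · omega
  by_cases h0 : pos = 0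
  · subst h0
    rw [stream_split b K hK]
    simp [List.getD]
  · rw [if_neg (by exact_mod_cast h0 : ¬ ((pos : Nat) : Int) = 0)]
    have e1 : ((pos : Nat) : Int).toNat = pos := Int.toNat_natCast pos
    have e2 : ((pos : Nat) : Int) - 1 = ((pos - 1 : Nat) : Int) := by omega
    have e3 : ((b : Nat) : Int) - 1 = (((b - 1) * b ^ (1 - 1) : Nat) : Int) := by
      simp
      omega
    have e4 : (1 : Int) = ((1 : Nat) : Int) := by norm_num
    rw [e1, e2, e3, e4, charAtB_eq b hb (pos + 1) (pos - 1) 1 (by omega)]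
    rw [stream_split b K hK]
    obtain ⟨q, rfl⟩ : ∃ q, pos = q + 1 := ⟨pos - 1, by omega⟩
    have hlen' : q < ((List.range' 1 (K - 1)).flatMap (rep b)).length := by
      have := congrArg List.length (stream_split b K hK)
      simp only [List.length_cons] at this
      omega
    have hgd : ('0' :: (List.range' 1 (K - 1)).flatMap (rep b)).getD (q + 1) ' ' =
        ((List.range' 1 (K - 1)).flatMap (rep b)).getD q ' ' := by
      simp [List.getD]
    rw [hgd]
    have hpow0 : (1 : Nat) - 1 = 0 := rfl
    have := nthCharAux_stream b hb (q + 1 + 1) q 1 (K - 1) (by omega) (by omega)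
      (by rw [show b ^ (1 - 1) = 1 from by simp]; exact hlen')
    rw [show b ^ (1 - 1) = 1 from by simp] at this
    simpa using this

-- ===== A-side lemmas (unchanged from the A reduction) =====

-- the positions i < L with i % m = r, in order, are r, r+m, r+2m, …
theorem filter_range_mod (mN r : Nat) (hr : r < mN) (L : Nat) :
    ∃ c, (List.range L).filter (fun i => decide ((i % mN) = r)) =
      (List.range c).map (fun j => r + j * mN) ∧ (∀ j, j < c ↔ r + j * mN < L) := by
  induction L with
  | zero => exact ⟨0, by simp, by omega⟩
  | succ L ih =>
    obtain ⟨c, hfil, hiff⟩ := ih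
    by_cases hL : L % mN = r
    · have hq : L = r + (L / mN) * mN := by
        have h := Nat.div_add_mod L mN
        rw [hL] at h
        nlinarith [h]
      have hqc : L / mN = c := by
        rcases Nat.lt_trichotomy (L / mN) c with h1 | h1 | h1
        · have h2 : r + (L / mN) * mN < L := (hiff (L / mN)).mp h1
          rw [← hq] at h2
          exact absurd h2 (lt_irrefl L)
        · exact h1
        · have h2 : c * mN < (L / mN) * mN :=
            (Nat.mul_lt_mul_right (show 0 < mN by omega)).mpr h1
          have h3 : r + c * mN < L := by rw [hq]; exact Nat.add_lt_add_left h2 r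
          exact absurd ((hiff c).mpr h3) (lt_irrefl c)
      have hLc : L = r + c * mN := by rw [← hqc]; exact hq
      refine ⟨c + 1, ?_, ?_⟩
      · rw [List.range_succ, List.filter_append, hfil, List.range_succ, List.map_append]
        have h4 : List.filter (fun i => decide (i % mN = r)) [L] = [L] := by simp [hL]
        rw [h4]
        simp [hLc]
      · intro j
        constructor
        · intro hj
          have h5 : j * mN ≤ c * mN := Nat.mul_le_mul_right mN (by omega)
          have : r + j * mN ≤ r + c * mN := by omega
          omega
        · intro hj
          have h6 : r + j * mN ≤ r + c * mN := by omega
          have h7 : j * mN ≤ c * mN := by omega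
          have h8 : j ≤ c := Nat.le_of_mul_le_mul_right h7 (by omega)
          omega
    · refine ⟨c, ?_, ?_⟩
      · rw [List.range_succ, List.filter_append, hfil]
        have h4 : List.filter (fun i => decide (i % mN = r)) [L] = [] := by simp [hL]
        rw [h4, List.append_nil]
      · intro j
        rw [hiff j]
        constructor
        · intro h; exact Nat.lt_succ_of_lt h
        · intro hj
          rcases Nat.lt_or_ge (r + j * mN) L with h | h
          · exact h
          · exfalso
            have hEq : r + j * mN = L := by omega
            apply hL
            rw [← hEq, Nat.add_mul_mod_self_right, Nat.mod_eq_of_lt hr]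

-- A's counting filter loop returns exactly the first t positions ≡ p-1 (mod m)
theorem selectAL_eq (t m p : Int) (mN pN : Nat) (hm : m = (mN : Int)) (hp : p = (pN : Int))
    (hm1 : 1 ≤ mN) (hp1 : 1 ≤ pN) (hpm : pN ≤ mN) (total : List Char)
    (hlen : t * m ≤ (total.length : Int)) :
    selectAL t m p total =
      (List.range t.toNat).map (fun j => total.getD ((pN - 1) + j * mN) ' ') := by
  have hcond : ∀ i : Nat, (PySem.Int.mod (i : Int) m = p - 1) ↔ (i % mN = pN - 1) := by
    intro i; rw [hm, hp, PySem.Int.mod_natCast]; omega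
  have key : ∀ L : Nat,
      (List.range L).foldl
        (fun (st : List Char × Int) (i : Nat) =>
          if PySem.Int.mod (i : Int) m = p - 1 ∧ st.2 < t
          then (st.1 ++ [total.getD i ' '], st.2 + 1) else st) ([], 0) =
      (((((List.range L).filter (fun i => decide (i % mN = pN - 1))).take t.toNat)).map
          (fun i => total.getD i ' '),
        ((min ((List.range L).filter (fun i => decide (i % mN = pN - 1))).length t.toNat : Nat) : Int)) := by
    intro L
    induction L with
    | zero => simp
    | succ L ihL =>
      rw [List.range_succ, List.foldl_append, ihL, List.filter_append]
      simp only [List.foldl_cons, List.foldl_nil]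
      by_cases hcL : L % mN = pN - 1
      · have hfL : List.filter (fun i => decide (i % mN = pN - 1)) [L] = [L] := by simp [hcL]
        rw [hfL]
        set len := ((List.range L).filter (fun i => decide (i % mN = pN - 1))).length with hlenL
        by_cases hlt : ((min len t.toNat : Nat) : Int) < t
        · have hlt' : len < t.toNat := by omega
          rw [if_pos ⟨(hcond L).mpr hcL, hlt⟩]
          simp only [Prod.mk.injEq]
          constructor
          · rw [List.take_append, show t.toNat - len = (t.toNat - len - 1) + 1 by omega]
            simp
          · simp only [List.length_append, List.length_singleton]
            push_cast
            omega
        · rw [if_neg (fun hh => hlt hh.2)]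
          simp only [Prod.mk.injEq]
          constructor
          · rw [List.take_append, show t.toNat - len = 0 by omega]
            simp
          · simp only [List.length_append, List.length_singleton]
            push_cast
            omega
      · have hfL : List.filter (fun i => decide (i % mN = pN - 1)) [L] = [] := by simp [hcL]
        rw [hfL, List.append_nil, if_neg (fun hh => hcL ((hcond L).mp hh.1))]
  obtain ⟨c, hfil, hiff⟩ := filter_range_mod mN (pN - 1) (by omega) total.length
  have hcge : t.toNat ≤ c := by
    rcases Nat.eq_zero_or_pos t.toNat with h0 | h0
    · omega
    · have hmul : ((t.toNat * mN : Nat) : Int) ≤ (total.length : Int) := by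
        push_cast
        calc ((t.toNat : Int)) * (mN : Int) = t * m := by rw [hm]; congr 1; omega
        _ ≤ total.length := hlen
      have e1 : t.toNat * mN ≤ total.length := by exact_mod_cast hmul
      have e2 : (t.toNat - 1) * mN + mN = t.toNat * mN := by
        cases h : t.toNat with
        | zero => omega
        | succ k => simp [Nat.succ_mul]
      have hx : (pN - 1) + (t.toNat - 1) * mN < total.length := by omega
      have := (hiff (t.toNat - 1)).mpr hx
      omega
  unfold selectAL
  rw [key total.length, hfil]
  rw [← List.map_take, List.take_range, Nat.min_eq_left hcge, List.map_map]
  rfl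

-- the filter loop collects nothing when t ≤ 0
theorem selectAL_nil_t (t m p : Int) (ht : t ≤ 0) (total : List Char) :
    selectAL t m p total = [] := by
  unfold selectAL
  have h : ∀ L : List Nat,
      L.foldl (fun (st : List Char × Int) (i : Nat) =>
        if PySem.Int.mod (i : Int) m = p - 1 ∧ st.2 < t
        then (st.1 ++ [total.getD i ' '], st.2 + 1) else st) ([], 0) = ([], 0) := by
    intro L
    induction L with
    | nil => rfl
    | cons a L ih =>
      rw [List.foldl_cons, if_neg (fun hh => by omega)]
      exact ih
  rw [h]

-- the filter loop collects nothing when the residue p-1 is outside 0..m-1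
theorem selectAL_nil_p (t m p : Int) (hm : 0 < m) (hbad : p - 1 < 0 ∨ m ≤ p - 1)
    (total : List Char) : selectAL t m p total = [] := by
  unfold selectAL
  have hno : ∀ i : Nat, ¬ (PySem.Int.mod (i : Int) m = p - 1) := by
    intro i hc
    have h1 : 0 ≤ PySem.Int.mod (i : Int) m := PySem.Int.mod_nonneg _ hm
    have h2 : PySem.Int.mod (i : Int) m < m := PySem.Int.mod_lt _ hm
    omega
  have h : ∀ (L : List Nat) (st : List Char × Int),
      L.foldl (fun (st : List Char × Int) (i : Nat) =>
        if PySem.Int.mod (i : Int) m = p - 1 ∧ st.2 < t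
        then (st.1 ++ [total.getD i ' '], st.2 + 1) else st) st = st := by
    intro L
    induction L with
    | nil => intro st; rfl
    | cons a L ih =>
      intro st
      rw [List.foldl_cons, if_neg (fun hh => hno a hh.1)]
      exact ih st
  rw [h]

theorem mainLoopAL_eq (n t m p : Int) (mN : Nat) (f : Nat → List Char)
    (hconv : ∀ x : Nat, convertA (x : Int) n = f x) (hne : ∀ x, f x ≠ [])
    (hm : m = (mN : Int)) (hm1 : 1 ≤ mN) :
    ∀ (fuel num : Nat) (total : List Char) (index : Int),
      total = stream f num → index = (total.length : Int) →
      (index < t * m ∨ num = 0) → t.toNat * mN + 1 ≤ num + fuel →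
      ∃ K, t * m ≤ ((stream f K).length : Int) ∧
        mainLoopAL fuel n t m p (num : Int) total index = selectAL t m p (stream f K) := by
  have hmpos : (0 : Int) < m := by rw [hm]; omega
  have hm0 : m ≠ 0 := by omega
  intro fuel
  induction fuel with
  | zero =>
    intro num total index htot hidx hinv hfuel
    exfalso
    have hfuel' : t.toNat * mN + 1 ≤ num := by simpa using hfuel
    have hidx0 : (num : Int) ≤ index := by
      rw [hidx, htot]; exact_mod_cast le_length_stream f num hne
    rcases hinv with hlt | h0
    · rcases le_or_gt t 0 with ht | ht
      · have h1 : t * m ≤ 0 := mul_nonpos_of_nonpos_of_nonneg ht (le_of_lt hmpos)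
        have h2 : (0 : Int) ≤ (num : Int) := by positivity
        linarith
      · have htN : (t.toNat : Int) = t := by omega
        have h1 : ((t.toNat * mN + 1 : Nat) : Int) ≤ (num : Int) := by exact_mod_cast hfuel'
        push_cast at h1
        rw [htN, ← hm] at h1
        linarith
    · subst h0
      simp at hfuel'
  | succ fuel ih =>
    intro num total index htot hidx hinv hfuel
    have hconv' : convertA (num : Int) n = f num := hconv num
    have hstep : mainLoopAL (fuel + 1) n t m p (num : Int) total index =
        (if PySem.Int.floordiv (index + ((f num).length : Int)) m ≥ t
         then selectAL t m p (total ++ f num)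
         else mainLoopAL fuel n t m p ((num : Int) + 1) (total ++ f num)
           (index + ((f num).length : Int))) := by
      simp only [mainLoopAL, hconv']
      rw [show PySem.Int.divmod? (index + ((f num).length : Int)) m
          = some (PySem.Int.floordiv (index + ((f num).length : Int)) m,
                  PySem.Int.mod (index + ((f num).length : Int)) m) from
        divmod_of_ne _ m hm0]
    rw [hstep]
    have hidx'_eq : index + ((f num).length : Int) = ((stream f (num + 1)).length : Int) := by
      rw [hidx, htot, stream_succ]; simp [List.length_append]
    by_cases hq : PySem.Int.floordiv (index + ((f num).length : Int)) m ≥ t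
    · rw [if_pos hq]
      refine ⟨num + 1, ?_, ?_⟩
      · rw [← hidx'_eq]
        exact (PySem.Int.le_floordiv_iff_mul_le hmpos).mp hq
      · rw [htot, ← stream_succ]
    · rw [if_neg hq]
      have hlt : index + ((f num).length : Int) < t * m :=
        (PySem.Int.floordiv_lt_iff_lt_mul hmpos).mp (by omega)
      obtain ⟨K, hK1, hK2⟩ := ih (num + 1) (total ++ f num)
        (index + ((f num).length : Int))
        (by rw [htot, stream_succ])
        (by rw [htot, ← stream_succ]; exact hidx'_eq) (Or.inl hlt) (by linarith [hfuel])
      refine ⟨K, hK1, ?_⟩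
      rw [← hK2]
      have hc : ((num : Int) + 1) = ((num + 1 : Nat) : Int) := by push_cast; ring
      rw [hc]

-- 1 // m ≥ t on every admitted degenerate input (t ≤ 0 with m ≥ 1, or t ≤ -1 with m ≤ -1)
theorem floordiv_one_ge (m t : Int) (hm0 : m ≠ 0) (hmt : 1 ≤ m ∨ t ≤ -1) (ht : t ≤ 0) :
    PySem.Int.floordiv 1 m ≥ t := by
  rcases lt_or_ge 0 m with hmp | hmn
  · have h0 : (0 : Int) ≤ PySem.Int.floordiv 1 m :=
      (PySem.Int.le_floordiv_iff_mul_le (by omega)).mpr (by omega)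
    omega
  · have hmneg : m ≤ -1 := by omega
    have ht1 : t ≤ -1 := by rcases hmt with h | h <;> omega
    have hdm := PySem.Int.floordiv_mul_add_mod 1 m
    have hmod := PySem.Int.mod_neg_bounds (a := 1) (b := m) (by omega)
    by_contra hcon
    have hfd : PySem.Int.floordiv 1 m ≤ -2 := by omega
    have hmul : PySem.Int.floordiv 1 m * m ≥ -2 * m :=
      mul_le_mul_of_nonpos_right hfd (by omega)
    nlinarith [hdm, hmod.1, hmod.2]

-- A's first iteration on t ≤ 0: convert(0) = "0", index = 1, 1 // m ≥ t, break, answer []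
theorem solution_t_nonpos (n t m p : Int) (hm0 : m ≠ 0) (hmt : 1 ≤ m ∨ t ≤ -1) (ht : t ≤ 0) :
    mainLoopAL (t.toNat * m.toNat + 1) n t m p 0 [] 0 = [] := by
  have hfuel : t.toNat * m.toNat + 1 = 1 := by
    have : t.toNat = 0 := by omega
    simp [this]
  rw [hfuel]
  have hc0 : convertA 0 n = ['0'] := by simp [convertA]
  simp only [mainLoopAL, hc0]
  rw [show ((0 : Int) + (([ '0' ] : List Char).length : Int)) = 1 by simp]
  rw [divmod_of_ne 1 m hm0]
  show (if PySem.Int.floordiv 1 m ≥ t then selectAL t m p ([] ++ ['0']) else []) = []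
  rw [if_pos (floordiv_one_ge m t hm0 hmt ht)]
  exact selectAL_nil_t t m p ht _

-- ===== VERDICT (by name: the statement is the Claim_ definition above) =====
theorem solution_spec : Claim_equal_solution := by
  intro n t m p hdom hpre
  obtain ⟨hm0, hmt, hcases⟩ := hpre
  unfold Spec_solution solution solution_alt
  rw [mainLoopA_toList]
  simp only [Array.toList_empty]
  rcases hcases with ht0 | ⟨ht1, hbadp, hn01⟩ | ⟨ht1, hp1, hpm, hn2, hrange⟩
  · -- t ≤ 0: both answer ""
    rw [if_pos (Or.inl ht0), solution_t_nonpos n t m p hm0 hmt ht0]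
  · -- person index outside 1..m: both answer ""
    have hm1 : (1 : Int) ≤ m := by rcases hmt with h | h <;> omega
    rw [if_pos (by omega : t ≤ 0 ∨ p < 1 ∨ m < p)]
    obtain ⟨K, _, hK⟩ := mainLoopAL_eq n t m p m.toNat
      (fun x => convertA (x : Int) n) (fun x => rfl)
      (fun x => convertA_ne_nil x n (by omega)) (by omega) (by omega)
      (t.toNat * m.toNat + 1) 0 [] 0 (by simp [stream]) (by simp) (Or.inr rfl) (by simp)
    push_cast at hK
    rw [hK, selectAL_nil_p t m p (by omega) (by omega) _]
  · -- the game proper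
    have hm1 : (1 : Int) ≤ m := by rcases hmt with h | h <;> omega
    have hguard : ¬ (t ≤ 0 ∨ p < 1 ∨ m < p) := by omega
    rw [if_neg hguard]
    have hn : n = ((n.toNat : Nat) : Int) := by omega
    have hm : m = ((m.toNat : Nat) : Int) := by omega
    have hp : p = ((p.toNat : Nat) : Int) := by omega
    have hb : 2 ≤ n.toNat := by omega
    have hmN1 : 1 ≤ m.toNat := by omega
    have hmpos : (0 : Int) < m := by omega
    have hneedtm : p + (t - 1) * m ≤ t * m := by nlinarith
    rcases hrange with hn16 | hneed16
    · -- base 2..16: A's numerals coincide with the canonical ones everywhere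
      have hconvB : ∀ x : Nat, convertA (x : Int) n = rep n.toNat x := by
        intro x
        rw [hn, convertA_eq_repA x n.toNat hb]
        exact repA_eq_rep n.toNat x hb (Or.inl (by omega))
      obtain ⟨KA, hKAlen, hKA⟩ := mainLoopAL_eq n t m p m.toNat (rep n.toNat)
        hconvB
        (fun x => rep_ne_nil n.toNat x hb) hm hmN1
        (t.toNat * m.toNat + 1) 0 [] 0 (by simp [stream]) (by simp) (Or.inr rfl) (by simp)
      push_cast at hKA
      rw [hKA]
      rw [selectAL_eq t m p m.toNat p.toNat hm hp hmN1 (by omega) (by omega) _ hKAlen]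
      congr 1
      have hpy : PySem.List.pyRange 0 t 1 = (List.range t.toNat).map (fun k : Nat => (k : Int)) := by
        have h := PySem.List.pyRange_zero_natCast (t.toNat)
        rw [Int.toNat_of_nonneg (by omega : (0:Int) ≤ t)] at h
        exact h
      rw [hpy, List.map_map]
      apply List.map_congr_left
      intro j hj
      have hjt : j < t.toNat := List.mem_range.mp hj
      have hjm : (j : Int) * m ≤ (t - 1) * m :=
        mul_le_mul_of_nonneg_right (by omega) (le_of_lt hmpos)
      have hneed : p - 1 + (j : Int) * m < p + (t - 1) * m := by linarith
      have hposcast : p - 1 + (j : Int) * m = (((p.toNat - 1) + j * m.toNat : Nat) : Int) := by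
        push_cast [Nat.cast_sub (show 1 ≤ p.toNat by omega)]
        rw [← hp, ← hm]
      have hKAc : ((p.toNat - 1) + j * m.toNat : Nat) < (stream (rep n.toNat) KA).length := by
        have : (((p.toNat - 1) + j * m.toNat : Nat) : Int) < ((stream (rep n.toNat) KA).length : Int) := by
          rw [← hposcast]; linarith
        exact_mod_cast this
      show (stream (rep n.toNat) KA).getD ((p.toNat - 1) + j * m.toNat) ' ' =
        (if p - 1 + (j : Int) * m = 0 then '0'
          else charAtB ((p - 1 + (j : Int) * m).toNat + 1) n (p - 1 + (j : Int) * m - 1) 1 (n - 1))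
      rw [hposcast]
      exact (altChar_eq_stream n.toNat n hn hb _ KA hKAc).symm
    · -- base ≥ 17 with need ≤ 16: only the first 16 characters (numerals 0..15) are selected,
      -- and there the A-numerals coincide with the canonical ones
      obtain ⟨KA, hKAlen, hKA⟩ := mainLoopAL_eq n t m p m.toNat (repA n.toNat)
        (fun x => by rw [hn]; exact convertA_eq_repA x n.toNat hb)
        (fun x => repA_ne_nil n.toNat x hb) hm hmN1
        (t.toNat * m.toNat + 1) 0 [] 0 (by simp [stream]) (by simp) (Or.inr rfl) (by simp)
      push_cast at hKA
      rw [hKA]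
      rw [selectAL_eq t m p m.toNat p.toNat hm hp hmN1 (by omega) (by omega) _ hKAlen]
      congr 1
      have hpy : PySem.List.pyRange 0 t 1 = (List.range t.toNat).map (fun k : Nat => (k : Int)) := by
        have h := PySem.List.pyRange_zero_natCast (t.toNat)
        rw [Int.toNat_of_nonneg (by omega : (0:Int) ≤ t)] at h
        exact h
      rw [hpy, List.map_map]
      apply List.map_congr_left
      intro j hj
      have hjt : j < t.toNat := List.mem_range.mp hj
      have hjm : (j : Int) * m ≤ (t - 1) * m :=
        mul_le_mul_of_nonneg_right (by omega) (le_of_lt hmpos)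
      have hneed : p - 1 + (j : Int) * m < p + (t - 1) * m := by linarith
      have hposcast : p - 1 + (j : Int) * m = (((p.toNat - 1) + j * m.toNat : Nat) : Int) := by
        push_cast [Nat.cast_sub (show 1 ≤ p.toNat by omega)]
        rw [← hp, ← hm]
      have hpos16 : ((p.toNat - 1) + j * m.toNat : Nat) < 16 := by
        have : (((p.toNat - 1) + j * m.toNat : Nat) : Int) < 16 := by
          rw [← hposcast]; omega
        exact_mod_cast this
      have hKAc : ((p.toNat - 1) + j * m.toNat : Nat) < (stream (repA n.toNat) KA).length := by
        have : (((p.toNat - 1) + j * m.toNat : Nat) : Int) < ((stream (repA n.toNat) KA).length : Int) := by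
          rw [← hposcast]; linarith
        exact_mod_cast this
      have hK16 : ((p.toNat - 1) + j * m.toNat : Nat) < (stream (rep n.toNat) 16).length :=
        lt_of_lt_of_le hpos16 (le_length_stream (rep n.toNat) 16 (fun x => rep_ne_nil n.toNat x hb))
      have hAchar : (stream (repA n.toNat) KA).getD ((p.toNat - 1) + j * m.toNat) ' ' =
          (stream (rep n.toNat) 16).getD ((p.toNat - 1) + j * m.toNat) ' ' :=
        getD_cross (repA n.toNat) (rep n.toNat) 16 KA 16 _
          (fun x => repA_ne_nil n.toNat x hb) (fun x => rep_ne_nil n.toNat x hb)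
          (fun x hx => repA_eq_rep n.toNat x hb (Or.inr hx)) hpos16 hKAc hK16
      show (stream (repA n.toNat) KA).getD ((p.toNat - 1) + j * m.toNat) ' ' =
        (if p - 1 + (j : Int) * m = 0 then '0'
          else charAtB ((p - 1 + (j : Int) * m).toNat + 1) n (p - 1 + (j : Int) * m - 1) 1 (n - 1))
      rw [hposcast, hAchar]
      exact (altChar_eq_stream n.toNat n hn hb _ 16 hK16).symm
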